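-- pv_equiv track=rewrite | github.com/dev-jsLee/junLib | core/json_utils.py | insert_before_key
-- ===== SOURCE A (Python) =====
-- from typing import Dict, Any, Optional, Union
--
-- def insert_before_key(target_dict: Dict[str, Any], new_key: str, new_value: Any, target_key: str) -> Dict[str, Any]:
--     """
--     딕셔너리에 새로운 키-값 쌍을 특정 키 이전에 삽입합니다.
--
--     Args:
--         target_dict (Dict[str, Any]): 대상 딕셔너리
--         new_key (str): 삽입할 키
--         new_value (Any): 삽입할 값
--         target_key (str): 기준이 되는 키
--
--     Returns:
--         Dict[str, Any]: 수정된 딕셔너리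
--
--     Raises:
--         KeyError: target_key가 딕셔너리에 없을 때
--     """
--     if not isinstance(target_dict, dict):
--         raise ValueError("target_dict는 딕셔너리여야 합니다.")
--
--     if target_key not in target_dict:
--         raise KeyError(f"키를 찾을 수 없습니다: {target_key}")
--
--     new_dict = {}
--     for key, value in target_dict.items():
--         if key == target_key:
--             new_dict[new_key] = new_value
--         new_dict[key] = value
--     return new_dict
-- ===== SOURCE B (Python) =====
-- def insert_before_key(target_dict, new_key, new_value, target_key):
--     if not isinstance(target_dict, dict):
--         raise ValueError("target_dict는 딕셔너리여야 합니다.")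
--
--     if target_key not in target_dict:
--         raise KeyError(f"키를 찾을 수 없습니다: {target_key}")
--
--     items = list(target_dict.items())
--     idx = list(target_dict).index(target_key)
--     return dict(items[:idx] + [(new_key, new_value)] + items[idx:])
-- ===== Notes on version B (the rewrite author's own statement) =====
-- stated objective: simpler
-- what changed: Replaces the per-key conditional rebuild loop with locate-then-splice: find the target key's position once, then build the result as dict(items[:idx] + [(new_key, new_value)] + items[idx:]).
import Mathlib
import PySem

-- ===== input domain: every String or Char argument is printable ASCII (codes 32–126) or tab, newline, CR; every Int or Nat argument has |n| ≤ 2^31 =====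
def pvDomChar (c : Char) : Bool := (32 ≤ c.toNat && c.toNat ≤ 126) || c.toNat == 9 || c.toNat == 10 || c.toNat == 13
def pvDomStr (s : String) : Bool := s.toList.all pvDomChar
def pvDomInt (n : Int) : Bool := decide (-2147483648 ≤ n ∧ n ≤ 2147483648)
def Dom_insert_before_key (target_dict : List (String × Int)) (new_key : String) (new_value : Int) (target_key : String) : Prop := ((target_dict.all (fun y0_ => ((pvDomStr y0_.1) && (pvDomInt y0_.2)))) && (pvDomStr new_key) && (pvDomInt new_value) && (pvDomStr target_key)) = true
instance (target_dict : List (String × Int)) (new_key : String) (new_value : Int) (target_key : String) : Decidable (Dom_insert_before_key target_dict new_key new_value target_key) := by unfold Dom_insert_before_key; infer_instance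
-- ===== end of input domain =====

-- B builds the result by locate-then-splice instead of A's per-key conditional rebuild loop; same values on all dict inputs.

-- ===== PORT A =====
-- A's loop: for key, value in target_dict.items(): if key == target_key: new_dict[new_key] = new_value; new_dict[key] = value
def insert_before_key (target_dict : List (String × Int)) (new_key : String) (new_value : Int) (target_key : String) : List (String × Int) :=
  -- `if target_key not in target_dict: raise KeyError(...)` — those inputs are excluded by Pre_; [] is a placeholder
  if (target_dict.map Prod.fst).contains target_key = false then []
  else
    (target_dict.foldl
      (fun (d : PySem.Dict String Int) kv =>
        (if kv.1 == target_key then d.insert new_key new_value else d).insert kv.1 kv.2)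
      PySem.Dict.empty).items

-- ===== PORT B =====
def insert_before_key_alt (target_dict : List (String × Int)) (new_key : String) (new_value : Int) (target_key : String) : List (String × Int) :=
  -- `if target_key not in target_dict: raise KeyError(...)` — excluded by Pre_; [] is a placeholder
  if (target_dict.map Prod.fst).contains target_key = false then []
  else
    match PySem.List.index? (target_dict.map Prod.fst) target_key with
    | none => []  -- unreachable: the guard above established membership
    | some idx =>
        (PySem.Dict.ofList
          (PySem.List.slice target_dict none (some (idx : Int)) ++ [(new_key, new_value)]
            ++ PySem.List.slice target_dict (some (idx : Int)) none)).items

-- ===== PRECONDITION & SPEC =====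
-- Pre_ excludes (a) inputs where A raises KeyError (target_key absent) and (b) association
-- lists with duplicate keys, which do not represent any Python dict input (a dict collapses
-- them before either function runs).
def Pre_insert_before_key (target_dict : List (String × Int)) (new_key : String) (new_value : Int) (target_key : String) : Prop :=
  target_key ∈ target_dict.map Prod.fst ∧ (target_dict.map Prod.fst).Nodup
instance (target_dict : List (String × Int)) (new_key : String) (new_value : Int) (target_key : String) : Decidable (Pre_insert_before_key target_dict new_key new_value target_key) := by unfold Pre_insert_before_key; infer_instance

def pvWitness_insert_before_key : (List (String × Int)) × String × Int × String :=
  ([("a", 1), ("b", 2), ("c", 3)], "x", 5, "b")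

def Spec_insert_before_key (target_dict : List (String × Int)) (new_key : String) (new_value : Int) (target_key : String) (out : List (String × Int)) : Prop := out = insert_before_key_alt target_dict new_key new_value target_key
instance (target_dict : List (String × Int)) (new_key : String) (new_value : Int) (target_key : String) (out : List (String × Int)) : Decidable (Spec_insert_before_key target_dict new_key new_value target_key out) := by unfold Spec_insert_before_key; infer_instance

-- ===== CLAIM (what is proved, stated in full; the proofs are below) =====
def Claim_equal_insert_before_key : Prop := ∀ (target_dict : List (String × Int)) (new_key : String) (new_value : Int) (target_key : String), Dom_insert_before_key target_dict new_key new_value target_key → Pre_insert_before_key target_dict new_key new_value target_key → Spec_insert_before_key target_dict new_key new_value target_key (insert_before_key target_dict new_key new_value target_key)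

-- ===== LEMMAS AND PROOFS =====

-- A's loop with no target key in sight is a plain insert fold.
lemma foldl_stepA_no_target (new_key target_key : String) (new_value : Int)
    (l : List (String × Int)) (d : PySem.Dict String Int)
    (h : target_key ∉ l.map Prod.fst) :
    l.foldl
      (fun (d : PySem.Dict String Int) kv =>
        (if kv.1 == target_key then d.insert new_key new_value else d).insert kv.1 kv.2) d
    = l.foldl (fun (d : PySem.Dict String Int) kv => d.insert kv.1 kv.2) d := by
  induction l generalizing d with
  | nil => rfl
  | cons kv rest ih =>
      simp only [List.map_cons, List.mem_cons, not_or] at h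
      have hb : (kv.1 == target_key) = false := beq_eq_false_iff_ne.mpr (fun he => h.1 he.symm)
      simp only [List.foldl_cons, hb, Bool.false_eq_true, if_false]
      exact ih _ h.2

-- A's conditional fold equals the plain insert fold over the spliced list.
lemma foldl_stepA_eq_splice (new_key target_key : String) (new_value : Int) :
    ∀ (td : List (String × Int)) (d : PySem.Dict String Int) (n : Nat),
    (td.map Prod.fst).Nodup →
    PySem.List.index? (td.map Prod.fst) target_key = some n →
    td.foldl
      (fun (d : PySem.Dict String Int) kv =>
        (if kv.1 == target_key then d.insert new_key new_value else d).insert kv.1 kv.2) d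
    = (td.take n ++ [(new_key, new_value)] ++ td.drop n).foldl
        (fun (d : PySem.Dict String Int) kv => d.insert kv.1 kv.2) d := by
  intro td
  induction td with
  | nil => intro d n _ h; simp [PySem.List.index?] at h
  | cons kv rest ih =>
      intro d n hnd hidx
      by_cases hk : kv.1 = target_key
      · rw [List.map_cons, hk, PySem.List.index?_cons_self] at hidx
        injection hidx with hn; subst hn
        simp only [List.map_cons, List.nodup_cons, hk] at hnd
        have hb : (kv.1 == target_key) = true := beq_iff_eq.mpr hk
        simp only [List.take_zero, List.drop_zero, List.nil_append, List.singleton_append,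
          List.foldl_cons, hb, if_true]
        exact foldl_stepA_no_target _ _ _ _ _ hnd.1
      · rw [List.map_cons, PySem.List.index?_cons_of_ne (h := hk)] at hidx
        cases hrest : PySem.List.index? (rest.map Prod.fst) target_key with
        | none => rw [hrest] at hidx; simp at hidx
        | some m =>
            rw [hrest] at hidx
            simp only [Option.map_some] at hidx
            injection hidx with hn; subst hn
            simp only [List.map_cons, List.nodup_cons] at hnd
            have hb : (kv.1 == target_key) = false := beq_eq_false_iff_ne.mpr hk
            simp only [List.take_succ_cons, List.drop_succ_cons, List.cons_append,
              List.foldl_cons, hb, Bool.false_eq_true, if_false]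
            exact ih _ m hnd.2 hrest

-- ===== VERDICT (by name: the statement is the Claim_ definition above) =====
theorem insert_before_key_spec : Claim_equal_insert_before_key := by
  intro td nk nv tk _ hpre
  obtain ⟨hmem, hnd⟩ := hpre
  unfold Spec_insert_before_key insert_before_key insert_before_key_alt
  have hcon : (td.map Prod.fst).contains tk = true := by
    simpa [List.contains_iff_mem] using hmem
  rw [hcon]
  simp only [Bool.true_eq_false, if_false]
  obtain ⟨n, hidx⟩ := Option.isSome_iff_exists.mp
    ((PySem.List.index?_isSome_iff _ _).mpr hmem)
  simp only [hidx]
  rw [PySem.List.slice_to_natCast, PySem.List.slice_from_natCast]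
  rw [foldl_stepA_eq_splice nk tk nv td PySem.Dict.empty n hnd hidx]
  rfl
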